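-- pv_equiv track=rewrite | github.com/ngraczykowski/iris-root | etl-pipeline/etl_pipeline/application/__init__.py | create_agent_input_agg_col_config
-- ===== SOURCE A (Python) =====
-- def create_agent_input_agg_col_config(agent_input_prepended_agent_name_config):
--     """Create the source and target columns based on the standardized agent input config.
--
--     Input:
--     { 'name_agent': {'name_agent_ap': ['record_name', 'whatever_other_name'],
--                      'name_agent_ap_aliases': [],
--                      'name_agent_wl': ['name_hit'],
--                      'name_agent_wl_aliases': []
--                     }
--     }
--
--     Output:
--     {'name_agent': {'ap_all_names_aggregated': ['name_agent_ap', 'name_agent_ap_aliases'],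
--                     'wl_all_names_aggregated': ['name_agent_wl', 'name_agent_wl_aliases']
--                    }
--     }
--     """
--
--     def _generate_simple_plural(word):
--         if word.lower().endswith("s"):
--             return word.lower() + "es"
--         elif word.lower().endswith("y") and word.lower()[-2:] not in [
--             "ay",
--             "ey",
--             "iy",
--             "oy",
--             "uy",
--         ]:
--             return word.lower()[:-1] + "ies"
--         else:
--             return word.lower() + "s"
--
--     def _get_ap_or_wl_agg_source_cols(level_1_value, party):
--         source_cols = []
--         for col in level_1_value.keys():
--             if (
--                 col.endswith(f"_{party}")
--                 or col.endswith(f"_{party}_aliases")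
--                 or col.startswith("hit")
--             ):
--                 source_cols.append(col)
--
--         return source_cols
--
--     agent_input_agg_col_config = {}
--
--     for agent_name, config in agent_input_prepended_agent_name_config.items():
--         agent_type = agent_name.split("_agent", 1)[0]
--         agent_ap_agg_col = f"""ap_all_{_generate_simple_plural(agent_type)}_aggregated"""
--         agent_wl_agg_col = f"""wl_all_{_generate_simple_plural(agent_type)}_aggregated"""
--         agent_ap_agg_source_cols = _get_ap_or_wl_agg_source_cols(config, "ap")
--         agent_wl_agg_source_cols = _get_ap_or_wl_agg_source_cols(config, "wl")
--
--         agent_input_agg_col_config[agent_name] = {}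
--         agent_input_agg_col_config[agent_name][agent_ap_agg_col] = agent_ap_agg_source_cols
--         agent_input_agg_col_config[agent_name][agent_wl_agg_col] = agent_wl_agg_source_cols
--
--     return agent_input_agg_col_config
-- ===== SOURCE B (Python) =====
-- def create_agent_input_agg_col_config(agent_input_prepended_agent_name_config):
--     """B: parse each column name once into its party tag (base_party[_aliases]
--     grammar, via rpartition) and dispatch on the tag, instead of filtering the
--     columns with four suffix predicates per party."""
--
--     def _plural(word):
--         w = word.lower()
--         if w.endswith("s"):
--             return w + "es"
--         if w.endswith("y") and w[-2:] not in ("ay", "ey", "iy", "oy", "uy"):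
--             return w[:-1] + "ies"
--         return w + "s"
--
--     def _party(col):
--         # grammar: <base>_<party>[_aliases] — the party is the token after the
--         # last '_' once a trailing 'aliases' token is stripped
--         stem, sep, last = col.rpartition("_")
--         if sep and last == "aliases":
--             stem, sep, last = stem.rpartition("_")
--         return last if sep else None
--
--     out = {}
--     for agent_name, config in agent_input_prepended_agent_name_config.items():
--         ap, wl = [], []
--         for col in config:
--             if col.startswith("hit"):
--                 ap.append(col)
--                 wl.append(col)
--             else:
--                 p = _party(col)
--                 if p == "ap":
--                     ap.append(col)
--                 elif p == "wl":
--                     wl.append(col)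
--         base = _plural(agent_name.split("_agent", 1)[0])
--         out[agent_name] = {
--             "ap_all_%s_aggregated" % base: ap,
--             "wl_all_%s_aggregated" % base: wl,
--         }
--     return out
-- ===== Notes on version B (the rewrite author's own statement) =====
-- stated objective: alternative
-- what changed: A filters each agent's columns twice with four endswith/startswith predicates per party; B instead parses each column name once into its party tag under the <base>_<party>[_aliases] grammar (rpartition at the last underscore, stripping one trailing 'aliases' token) and dispatches on that tag in a single pass.
import Mathlib
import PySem

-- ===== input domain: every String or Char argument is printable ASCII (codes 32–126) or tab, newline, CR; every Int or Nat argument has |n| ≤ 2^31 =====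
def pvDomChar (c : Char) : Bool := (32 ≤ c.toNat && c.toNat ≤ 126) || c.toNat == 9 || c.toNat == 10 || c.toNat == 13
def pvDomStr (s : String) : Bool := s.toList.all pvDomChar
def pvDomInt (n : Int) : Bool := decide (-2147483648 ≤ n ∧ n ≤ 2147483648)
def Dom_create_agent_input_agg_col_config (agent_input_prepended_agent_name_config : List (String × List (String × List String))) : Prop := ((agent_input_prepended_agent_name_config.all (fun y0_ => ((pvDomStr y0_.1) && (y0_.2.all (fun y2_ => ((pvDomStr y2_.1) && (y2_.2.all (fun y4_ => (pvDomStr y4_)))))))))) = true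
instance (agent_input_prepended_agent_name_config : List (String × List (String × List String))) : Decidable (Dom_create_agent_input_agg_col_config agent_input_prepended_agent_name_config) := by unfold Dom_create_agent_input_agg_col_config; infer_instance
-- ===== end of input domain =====

-- B parses each column name once into its party tag (the <base>_<party>[_aliases] grammar,
-- via rpartition) and dispatches on the tag, instead of A's four suffix predicates per party (alternative decomposition).

-- ===== PORT A =====
-- word.split("_agent", 1)[0]: split with a non-empty separator always yields a
-- non-empty list, so the fallback "" is never reached (exact).
def pvSplitAgentHead (s : String) : String :=
  match PySem.Str.splitMax? s "_agent" 1 with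
  | some (x :: _) => x
  | _ => ""

-- _generate_simple_plural, recomputing word.lower() at each use like A does
def pvPluralA (word : String) : String :=
  if PySem.Str.endswith (PySem.Str.lower word) "s" then
    PySem.Str.lower word ++ "es"
  else if PySem.Str.endswith (PySem.Str.lower word) "y"
      && !(["ay", "ey", "iy", "oy", "uy"].contains (PySem.Str.slice (PySem.Str.lower word) (some (-2)) none)) then
    PySem.Str.slice (PySem.Str.lower word) none (some (-1)) ++ "ies"
  else
    PySem.Str.lower word ++ "s"

-- _get_ap_or_wl_agg_source_cols
def pvGetAggSourceCols (level_1_value : PySem.Dict String (List String)) (party : String) : List String :=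
  level_1_value.keys.foldl
    (fun source_cols col =>
      if PySem.Str.endswith col ("_" ++ party)
          || PySem.Str.endswith col ("_" ++ party ++ "_aliases")
          || PySem.Str.startswith col "hit" then
        source_cols ++ [col]
      else source_cols)
    []

def create_agent_input_agg_col_config (agent_input_prepended_agent_name_config : List (String × List (String × List String))) : List (String × List (String × List String)) :=
  ((PySem.Dict.ofList agent_input_prepended_agent_name_config).items.foldl
    (fun (out : PySem.Dict String (List (String × List String))) item =>
      let agent_name := item.1
      let config : PySem.Dict String (List String) := PySem.Dict.ofList item.2
      let agent_type := pvSplitAgentHead agent_name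
      let agent_ap_agg_col := "ap_all_" ++ pvPluralA agent_type ++ "_aggregated"
      let agent_wl_agg_col := "wl_all_" ++ pvPluralA agent_type ++ "_aggregated"
      let agent_ap_agg_source_cols := pvGetAggSourceCols config "ap"
      let agent_wl_agg_source_cols := pvGetAggSourceCols config "wl"
      let inner : PySem.Dict String (List String) :=
        (PySem.Dict.empty.insert agent_ap_agg_col agent_ap_agg_source_cols).insert
          agent_wl_agg_col agent_wl_agg_source_cols
      out.insert agent_name inner.items)
    PySem.Dict.empty).items

-- ===== PORT B =====
-- _plural from Source B: lowercase once, then the three cases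
def pvPluralB (word : String) : String :=
  let w := PySem.Str.lower word
  if PySem.Str.endswith w "s" then w ++ "es"
  else if PySem.Str.endswith w "y"
      && !(["ay", "ey", "iy", "oy", "uy"].contains (PySem.Str.slice w (some (-2)) none)) then
    PySem.Str.slice w none (some (-1)) ++ "ies"
  else w ++ "s"

-- col.rpartition("_"), hand-ported for Source B's one-char separator (PySem has no rpartition);
-- exact: Python splits at the LAST occurrence, and ("", "", col) when '_' is absent —
-- the Bool is the truthiness of the returned separator. Result: (head, sep-found, tail).
def pvRPartU (cs : List Char) : List Char × Bool × List Char :=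
  match cs.reverse.span (fun c => c != '_') with
  | (t, []) => ([], false, t.reverse)
  | (t, _ :: r) => (r.reverse, true, t.reverse)

-- _party from Source B: strip one trailing 'aliases' token, return the token after the last '_'
def pvParty (col : List Char) : Option (List Char) :=
  let r1 := pvRPartU col
  let r2 := if r1.2.1 && decide (r1.2.2 = ['a','l','i','a','s','e','s']) then pvRPartU r1.1 else r1
  if r2.2.1 then some r2.2.2 else none

def create_agent_input_agg_col_config_alt (agent_input_prepended_agent_name_config : List (String × List (String × List String))) : List (String × List (String × List String)) :=
  ((PySem.Dict.ofList agent_input_prepended_agent_name_config).items.foldl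
    (fun (out : PySem.Dict String (List (String × List String))) item =>
      let config : PySem.Dict String (List String) := PySem.Dict.ofList item.2
      let bk := config.keys.foldl
        (fun (p : List String × List String) col =>
          if PySem.Str.startswith col "hit" then (p.1 ++ [col], p.2 ++ [col])
          else match pvParty col.toList with
            | some t =>
                if t = ['a','p'] then (p.1 ++ [col], p.2)
                else if t = ['w','l'] then (p.1, p.2 ++ [col])
                else p
            | none => p)
        ([], [])
      let base := pvPluralB (pvSplitAgentHead item.1)
      out.insert item.1
        [("ap_all_" ++ base ++ "_aggregated", bk.1), ("wl_all_" ++ base ++ "_aggregated", bk.2)])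
    PySem.Dict.empty).items

-- ===== PRECONDITION & SPEC =====
def Spec_create_agent_input_agg_col_config (agent_input_prepended_agent_name_config : List (String × List (String × List String))) (out : List (String × List (String × List String))) : Prop := out = create_agent_input_agg_col_config_alt agent_input_prepended_agent_name_config
instance (agent_input_prepended_agent_name_config : List (String × List (String × List String))) (out : List (String × List (String × List String))) : Decidable (Spec_create_agent_input_agg_col_config agent_input_prepended_agent_name_config out) := by unfold Spec_create_agent_input_agg_col_config; infer_instance

-- ===== CLAIM (what is proved, stated in full; the proofs are below) =====
def Claim_equal_create_agent_input_agg_col_config : Prop := ∀ (agent_input_prepended_agent_name_config : List (String × List (String × List String))), Dom_create_agent_input_agg_col_config agent_input_prepended_agent_name_config → Spec_create_agent_input_agg_col_config agent_input_prepended_agent_name_config (create_agent_input_agg_col_config agent_input_prepended_agent_name_config)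

-- ===== LEMMAS AND PROOFS =====
lemma pvPlural_eq (word : String) : pvPluralA word = pvPluralB word := rfl

lemma pvTakeSep (xs ys : List Char) (h : '_' ∉ xs) :
    (xs ++ '_' :: ys).takeWhile (fun c => c != '_') = xs := by
  induction xs with
  | nil => simp
  | cons x xs ih =>
    have hx : x ≠ '_' := fun hc => h (by simp [hc])
    simp [hx, ih (fun hc => h (List.mem_cons_of_mem _ hc))]

lemma pvDropSep (xs ys : List Char) (h : '_' ∉ xs) :
    (xs ++ '_' :: ys).dropWhile (fun c => c != '_') = '_' :: ys := by
  induction xs with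
  | nil => simp
  | cons x xs ih =>
    have hx : x ≠ '_' := fun hc => h (by simp [hc])
    simp [hx, ih (fun hc => h (List.mem_cons_of_mem _ hc))]

lemma pvRPartU_found (stem last : List Char) (h : '_' ∉ last) :
    pvRPartU (stem ++ '_' :: last) = (stem, true, last) := by
  unfold pvRPartU
  have hrev : (stem ++ '_' :: last).reverse = last.reverse ++ '_' :: stem.reverse := by
    simp [List.reverse_append]
  have hnr : '_' ∉ last.reverse := by simpa using h
  rw [hrev, List.span_eq_takeWhile_dropWhile, pvTakeSep _ _ hnr, pvDropSep _ _ hnr]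
  simp

lemma pvRPartU_true (cs s l : List Char) (h : pvRPartU cs = (s, true, l)) :
    cs = s ++ '_' :: l ∧ '_' ∉ l := by
  unfold pvRPartU at h
  rcases e : cs.reverse.span (fun c => c != '_') with ⟨t, d⟩
  rw [e] at h
  cases d with
  | nil => simp at h
  | cons x r =>
    simp only [Prod.mk.injEq] at h
    obtain ⟨hs, -, hl⟩ := h
    have hspan := e
    rw [List.span_eq_takeWhile_dropWhile, Prod.mk.injEq] at hspan
    obtain ⟨ht, hd⟩ := hspan
    have hne : cs.reverse.dropWhile (fun c => c != '_') ≠ [] := by rw [hd]; simp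
    have hx := List.head_dropWhile_not (l := cs.reverse) (p := fun c => c != '_') hne
    have hhead : (cs.reverse.dropWhile (fun c => c != '_')).head hne = x := by
      simp [hd]
    rw [hhead] at hx
    have hx' : x = '_' := by simpa using hx
    have hnt : '_' ∉ t := by
      intro hm
      rw [← ht] at hm
      have := List.mem_takeWhile_imp hm
      simp at this
    constructor
    · have hcs : cs.reverse = t ++ x :: r := by
        rw [← ht, ← hd, List.takeWhile_append_dropWhile]
      have h2 : cs = (t ++ x :: r).reverse := by
        rw [← hcs, List.reverse_reverse]
      rw [h2, hx', ← hs, ← hl]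
      simp
    · rw [← hl]; simpa using hnt

-- pvParty cs = some pat  ⟺  cs ends with "_<pat>" or "_<pat>_aliases"
lemma pvParty_iff (cs pat : List Char) (hne : pat ≠ ['a','l','i','a','s','e','s'])
    (hv : '_' ∉ pat) :
    pvParty cs = some pat ↔
      (('_' :: pat) <:+ cs ∨ ('_' :: pat ++ '_' :: ['a','l','i','a','s','e','s']) <:+ cs) := by
  constructor
  · intro h
    rcases e1 : pvRPartU cs with ⟨s1, b1, l1⟩
    simp only [pvParty, e1] at h
    cases b1 with
    | false => simp at h
    | true =>
      obtain ⟨hcs, hl1⟩ := pvRPartU_true cs s1 l1 e1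
      by_cases hal : l1 = ['a','l','i','a','s','e','s']
      · subst hal
        rcases e2 : pvRPartU s1 with ⟨s2, b2, l2⟩
        simp only [decide_true, Bool.and_true, if_true, e2] at h
        cases b2 with
        | false => simp at h
        | true =>
          simp only [if_true, Option.some.injEq] at h
          obtain ⟨hs1, -⟩ := pvRPartU_true s1 s2 l2 e2
          right
          refine ⟨s2, ?_⟩
          rw [hcs, hs1, h]
          simp
      · simp [hal] at h
        left
        exact ⟨s1, by rw [hcs, h]⟩
  · rintro (⟨t, rfl⟩ | ⟨t, rfl⟩)
    · simp [pvParty, pvRPartU_found t pat hv, hne]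
    · have h1 : t ++ ('_' :: pat ++ '_' :: ['a','l','i','a','s','e','s'])
          = (t ++ '_' :: pat) ++ '_' :: ['a','l','i','a','s','e','s'] := List.append_cons .. ▸ by simp
      have e1 : pvRPartU ((t ++ '_' :: pat) ++ '_' :: ['a','l','i','a','s','e','s'])
          = (t ++ '_' :: pat, true, ['a','l','i','a','s','e','s']) := pvRPartU_found _ _ (by decide)
      have e2 : pvRPartU (t ++ '_' :: pat) = (t, true, pat) := pvRPartU_found t pat hv
      rw [h1]
      simp only [pvParty, e1, e2]
      simp

-- per-column: B's parse-and-dispatch step equals A's two predicate tests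
lemma pvStep_eq (c : String) (a w : List String) :
    (if PySem.Str.startswith c "hit" then (a ++ [c], w ++ [c])
     else match pvParty c.toList with
       | some t =>
           if t = ['a','p'] then (a ++ [c], w)
           else if t = ['w','l'] then (a, w ++ [c])
           else (a, w)
       | none => (a, w))
    = ((if PySem.Str.endswith c "_ap" || PySem.Str.endswith c "_ap_aliases" || PySem.Str.startswith c "hit" then a ++ [c] else a),
       (if PySem.Str.endswith c "_wl" || PySem.Str.endswith c "_wl_aliases" || PySem.Str.startswith c "hit" then w ++ [c] else w)) := by
  have lh : ("hit" : String).toList = ['h','i','t'] := by decide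
  have l1 : ("_ap" : String).toList = ['_','a','p'] := by decide
  have l2 : ("_ap_aliases" : String).toList = ['_','a','p','_','a','l','i','a','s','e','s'] := by decide
  have l3 : ("_wl" : String).toList = ['_','w','l'] := by decide
  have l4 : ("_wl_aliases" : String).toList = ['_','w','l','_','a','l','i','a','s','e','s'] := by decide
  have hap : pvParty c.toList = some ['a','p'] ↔
      (PySem.Chars.endswith c.toList ['_','a','p'] = true ∨
       PySem.Chars.endswith c.toList ['_','a','p','_','a','l','i','a','s','e','s'] = true) := by
    rw [pvParty_iff c.toList ['a','p'] (by decide) (by decide)]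
    simp [PySem.Chars.endswith_iff]
  have hwl : pvParty c.toList = some ['w','l'] ↔
      (PySem.Chars.endswith c.toList ['_','w','l'] = true ∨
       PySem.Chars.endswith c.toList ['_','w','l','_','a','l','i','a','s','e','s'] = true) := by
    rw [pvParty_iff c.toList ['w','l'] (by decide) (by decide)]
    simp [PySem.Chars.endswith_iff]
  simp only [PySem.Str.startswith_eq, PySem.Str.endswith_eq, lh, l1, l2, l3, l4]
  cases hh : PySem.Chars.startswith c.toList ['h','i','t'] with
  | true => simp [hh]
  | false =>
    rcases e : pvParty c.toList with _ | t
    · have ha1 : PySem.Chars.endswith c.toList ['_','a','p'] = false := by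
        cases hb : PySem.Chars.endswith c.toList ['_','a','p'] with
        | false => rfl
        | true => exact absurd (hap.mpr (Or.inl hb)) (by simp [e])
      have ha2 : PySem.Chars.endswith c.toList ['_','a','p','_','a','l','i','a','s','e','s'] = false := by
        cases hb : PySem.Chars.endswith c.toList ['_','a','p','_','a','l','i','a','s','e','s'] with
        | false => rfl
        | true => exact absurd (hap.mpr (Or.inr hb)) (by simp [e])
      have hw1 : PySem.Chars.endswith c.toList ['_','w','l'] = false := by
        cases hb : PySem.Chars.endswith c.toList ['_','w','l'] with
        | false => rfl
        | true => exact absurd (hwl.mpr (Or.inl hb)) (by simp [e])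
      have hw2 : PySem.Chars.endswith c.toList ['_','w','l','_','a','l','i','a','s','e','s'] = false := by
        cases hb : PySem.Chars.endswith c.toList ['_','w','l','_','a','l','i','a','s','e','s'] with
        | false => rfl
        | true => exact absurd (hwl.mpr (Or.inr hb)) (by simp [e])
      simp [hh, e, ha1, ha2, hw1, hw2]
    · by_cases hta : t = ['a','p']
      · subst hta
        have ha := hap.mp e
        have hw1 : PySem.Chars.endswith c.toList ['_','w','l'] = false := by
          cases hb : PySem.Chars.endswith c.toList ['_','w','l'] with
          | false => rfl
          | true =>
            have := hwl.mpr (Or.inl hb); rw [e] at this; simp at this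
        have hw2 : PySem.Chars.endswith c.toList ['_','w','l','_','a','l','i','a','s','e','s'] = false := by
          cases hb : PySem.Chars.endswith c.toList ['_','w','l','_','a','l','i','a','s','e','s'] with
          | false => rfl
          | true =>
            have := hwl.mpr (Or.inr hb); rw [e] at this; simp at this
        rcases ha with h1 | h1 <;> simp [hh, e, h1, hw1, hw2]
      · by_cases htw : t = ['w','l']
        · subst htw
          have hw := hwl.mp e
          have ha1 : PySem.Chars.endswith c.toList ['_','a','p'] = false := by
            cases hb : PySem.Chars.endswith c.toList ['_','a','p'] with
            | false => rfl
            | true =>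
              have := hap.mpr (Or.inl hb); rw [e] at this; simp at this
          have ha2 : PySem.Chars.endswith c.toList ['_','a','p','_','a','l','i','a','s','e','s'] = false := by
            cases hb : PySem.Chars.endswith c.toList ['_','a','p','_','a','l','i','a','s','e','s'] with
            | false => rfl
            | true =>
              have := hap.mpr (Or.inr hb); rw [e] at this; simp at this
          rcases hw with h1 | h1 <;> simp [hh, e, hta, h1, ha1, ha2]
        · have ha1 : PySem.Chars.endswith c.toList ['_','a','p'] = false := by
            cases hb : PySem.Chars.endswith c.toList ['_','a','p'] with
            | false => rfl
            | true =>
              have := hap.mpr (Or.inl hb); rw [e] at this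
              simp only [Option.some.injEq] at this; exact absurd this hta
          have ha2 : PySem.Chars.endswith c.toList ['_','a','p','_','a','l','i','a','s','e','s'] = false := by
            cases hb : PySem.Chars.endswith c.toList ['_','a','p','_','a','l','i','a','s','e','s'] with
            | false => rfl
            | true =>
              have := hap.mpr (Or.inr hb); rw [e] at this
              simp only [Option.some.injEq] at this; exact absurd this hta
          have hw1 : PySem.Chars.endswith c.toList ['_','w','l'] = false := by
            cases hb : PySem.Chars.endswith c.toList ['_','w','l'] with
            | false => rfl
            | true =>
              have := hwl.mpr (Or.inl hb); rw [e] at this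
              simp only [Option.some.injEq] at this; exact absurd this htw
          have hw2 : PySem.Chars.endswith c.toList ['_','w','l','_','a','l','i','a','s','e','s'] = false := by
            cases hb : PySem.Chars.endswith c.toList ['_','w','l','_','a','l','i','a','s','e','s'] with
            | false => rfl
            | true =>
              have := hwl.mpr (Or.inr hb); rw [e] at this
              simp only [Option.some.injEq] at this; exact absurd this htw
          simp [hh, e, hta, htw, ha1, ha2, hw1, hw2]

-- B's single parse-and-dispatch fold factors into A's two filter folds
lemma pvFold_eq (cols : List String) (a w : List String) :
    cols.foldl (fun (p : List String × List String) col =>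
      if PySem.Str.startswith col "hit" then (p.1 ++ [col], p.2 ++ [col])
      else match pvParty col.toList with
        | some t =>
            if t = ['a','p'] then (p.1 ++ [col], p.2)
            else if t = ['w','l'] then (p.1, p.2 ++ [col])
            else p
        | none => p) (a, w)
    = (cols.foldl (fun acc col => if PySem.Str.endswith col "_ap" || PySem.Str.endswith col "_ap_aliases" || PySem.Str.startswith col "hit" then acc ++ [col] else acc) a,
       cols.foldl (fun acc col => if PySem.Str.endswith col "_wl" || PySem.Str.endswith col "_wl_aliases" || PySem.Str.startswith col "hit" then acc ++ [col] else acc) w) := by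
  induction cols generalizing a w with
  | nil => rfl
  | cons c cs ih =>
    simp only [List.foldl_cons]
    rw [show (if PySem.Str.startswith c "hit" then (a ++ [c], w ++ [c])
      else match pvParty c.toList with
        | some t =>
            if t = ['a','p'] then (a ++ [c], w)
            else if t = ['w','l'] then (a, w ++ [c])
            else (a, w)
        | none => (a, w)) = _ from pvStep_eq c a w]
    exact ih _ _

lemma pv_ap_ne_wl (s : String) :
    ("ap_all_" ++ s ++ "_aggregated") ≠ ("wl_all_" ++ s ++ "_aggregated") := by
  intro h
  have h2 := congrArg (fun t : String => PySem.Str.pyGet? t 0) h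
  simp [PySem.Str.pyGet?] at h2

lemma pv_inner_items (k1 k2 : String) (v1 v2 : List String) (h : k1 ≠ k2) :
    ((PySem.Dict.empty.insert k1 v1).insert k2 v2).items = [(k1, v1), (k2, v2)] := by
  rw [PySem.Dict.items_insert_of_not_contains, PySem.Dict.items_insert_of_not_contains]
  · simp [PySem.Dict.empty]
  · simp [PySem.Dict.contains_empty]
  · simp [PySem.Dict.contains_insert, PySem.Dict.contains_empty]
    exact fun hh => h hh.symm

-- ===== VERDICT (by name: the statement is the Claim_ definition above) =====
theorem create_agent_input_agg_col_config_spec : Claim_equal_create_agent_input_agg_col_config := by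
  intro x _
  unfold Spec_create_agent_input_agg_col_config
  unfold create_agent_input_agg_col_config create_agent_input_agg_col_config_alt
  congr 2
  funext out item
  simp only [pvGetAggSourceCols, pvPlural_eq,
    show ("_" ++ "ap" : String) = "_ap" from by decide,
    show ("_ap" ++ "_aliases" : String) = "_ap_aliases" from by decide,
    show ("_" ++ "wl" : String) = "_wl" from by decide,
    show ("_wl" ++ "_aliases" : String) = "_wl_aliases" from by decide,
    pvFold_eq]
  rw [pv_inner_items _ _ _ _ (pv_ap_ne_wl _)]
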